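-- pv_equiv track=rewrite | github.com/munim1216/adventOfCode | day_4_part1_OLD.py | get_right_diagonal_arr
-- ===== SOURCE A (Python) =====
-- def get_right_diagonal_arr(array):
--     diag = []
--     for r in range(len(array)):
--         diag.append(right_diag(array, r, 0, ""))
--
--     c = len(array) - 1
--     while c > 0:
--         diag.append(right_diag(array, 0, c, ""))
--         c -= 1
--
--     return diag
--
-- def right_diag(array, r, c, diagonal_line):
--     if r < len(array) and c < len(array):
--         diagonal_line += array[r][c]
--         return right_diag(array, r + 1, c + 1, diagonal_line)
--     else:
--         return diagonal_line
-- ===== SOURCE B (Python) =====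
-- def get_right_diagonal_arr(array):
--     n = len(array)
--     diag = [''.join(array[r + k][k] for k in range(n - r)) for r in range(n)]
--     diag += [''.join(array[k][c + k] for k in range(n - c)) for c in range(n - 1, 0, -1)]
--     return diag
-- ===== Notes on version B (the rewrite author's own statement) =====
-- stated objective: simpler
-- what changed: Replaces the recursive diagonal-walking helper and the explicit while loop with two range comprehensions that build each diagonal by joining cells at computed offsets.
import Mathlib
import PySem

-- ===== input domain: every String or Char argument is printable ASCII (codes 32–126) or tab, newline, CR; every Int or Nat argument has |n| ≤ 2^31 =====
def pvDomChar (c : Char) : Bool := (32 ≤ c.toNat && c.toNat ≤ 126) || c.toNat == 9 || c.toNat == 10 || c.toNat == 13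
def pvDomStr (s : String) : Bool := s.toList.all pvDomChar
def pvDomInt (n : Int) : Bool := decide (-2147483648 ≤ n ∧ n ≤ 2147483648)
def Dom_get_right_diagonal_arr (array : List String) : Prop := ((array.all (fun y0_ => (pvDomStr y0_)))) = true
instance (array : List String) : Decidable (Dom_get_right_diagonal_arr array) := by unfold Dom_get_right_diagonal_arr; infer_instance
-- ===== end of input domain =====

-- B replaces A's recursive diagonal walker and while loop by two range comprehensions (simpler decomposition, same cost).

-- ===== PORT A =====

-- array[r][c] as a one-character string (the indices A uses are nonnegative; inside Pre_ they are in range, so the default is never returned there)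
def pvCell (array : List String) (r c : Nat) : String :=
  String.singleton (((array.getD r "").toList.getD c ' '))

-- transliteration of right_diag
def right_diagA (array : List String) (r c : Nat) (diagonal_line : String) : String :=
  if r < array.length ∧ c < array.length then
    right_diagA array (r + 1) (c + 1) (diagonal_line ++ pvCell array r c)
  else
    diagonal_line
termination_by array.length - r

-- transliteration of the while loop: c counts down from len(array)-1 while c > 0
def whileA (array : List String) (c : Nat) (diag : List String) : List String :=
  if c > 0 then
    whileA array (c - 1) (diag ++ [right_diagA array 0 c ""])
  else
    diag
termination_by c

def get_right_diagonal_arr (array : List String) : List String :=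
  whileA array (array.length - 1)
    ((List.range array.length).map (fun r => right_diagA array r 0 ""))

-- ===== PORT B =====

-- ''.join over a list of one-character strings
def pvJoin : List String → String
  | [] => ""
  | x :: xs => x ++ pvJoin xs

def get_right_diagonal_arr_alt (array : List String) : List String :=
  let n := array.length
  ((List.range n).map (fun r => pvJoin ((List.range (n - r)).map (fun k => pvCell array (r + k) k))))
  ++ ((List.range (n - 1)).map (fun i =>
        let c := n - 1 - i
        pvJoin ((List.range (n - c)).map (fun k => pvCell array k (c + k)))))

-- ===== PRECONDITION & SPEC =====
-- Pre_ excludes exactly the inputs on which Python A raises IndexError: a row shorter than the matrix height.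
def Pre_get_right_diagonal_arr (array : List String) : Prop :=
  ∀ row ∈ array, array.length ≤ row.length

instance (array : List String) : Decidable (Pre_get_right_diagonal_arr array) := by
  unfold Pre_get_right_diagonal_arr; infer_instance

def pvWitness_get_right_diagonal_arr : List String := ["ab", "cd"]

def Spec_get_right_diagonal_arr (array : List String) (out : List String) : Prop := out = get_right_diagonal_arr_alt array
instance (array : List String) (out : List String) : Decidable (Spec_get_right_diagonal_arr array out) := by unfold Spec_get_right_diagonal_arr; infer_instance

-- ===== CLAIM (what is proved, stated in full; the proofs are below) =====
def Claim_equal_get_right_diagonal_arr : Prop := ∀ (array : List String), Dom_get_right_diagonal_arr array → Pre_get_right_diagonal_arr array → Spec_get_right_diagonal_arr array (get_right_diagonal_arr array)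

-- ===== LEMMAS AND PROOFS =====

theorem right_diagA_closed (array : List String) :
    ∀ fuel r c s, array.length - r ≤ fuel →
    right_diagA array r c s =
      s ++ pvJoin ((List.range (min (array.length - r) (array.length - c))).map
        (fun k => pvCell array (r + k) (c + k))) := by
  intro fuel
  induction fuel with
  | zero =>
    intro r c s h
    have hr : ¬ r < array.length := by omega
    rw [right_diagA]
    simp [hr, show min (array.length - r) (array.length - c) = 0 by omega, pvJoin]
  | succ m ih =>
    intro r c s h
    by_cases hc : r < array.length ∧ c < array.length
    · rw [right_diagA, if_pos hc]
      rw [ih (r + 1) (c + 1) _ (by omega)]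
      have hmin : min (array.length - r) (array.length - c)
          = min (array.length - (r + 1)) (array.length - (c + 1)) + 1 := by omega
      rw [hmin, List.range_succ_eq_map, List.map_cons, List.map_map]
      simp only [pvJoin, Nat.add_zero, String.append_assoc]
      congr 1
      congr 1
      congr 1
      apply List.map_congr_left
      intro k _
      have h1 : r + 1 + k = r + (k + 1) := by omega
      have h2 : c + 1 + k = c + (k + 1) := by omega
      simp [Function.comp_apply, h1, h2]
    · rw [right_diagA, if_neg hc]
      have : min (array.length - r) (array.length - c) = 0 := by omega
      simp [this, pvJoin]

theorem whileA_closed (array : List String) :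
    ∀ c acc, whileA array c acc =
      acc ++ (List.range c).map (fun i => right_diagA array 0 (c - i) "") := by
  intro c
  induction c with
  | zero => intro acc; rw [whileA]; simp
  | succ m ih =>
    intro acc
    rw [whileA, if_pos (Nat.succ_pos m)]
    rw [Nat.succ_sub_one, ih]
    rw [List.range_succ_eq_map, List.map_cons, List.map_map]
    simp only [Nat.sub_zero, List.append_assoc, List.singleton_append]
    congr 1
    congr 1
    apply List.map_congr_left
    intro i _
    have h1 : m + 1 - (i + 1) = m - i := by omega
    simp only [Function.comp_apply, Nat.succ_eq_add_one, h1]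

-- ===== VERDICT (by name: the statement is the Claim_ definition above) =====
theorem get_right_diagonal_arr_spec : Claim_equal_get_right_diagonal_arr := by
  intro array _ _
  unfold Spec_get_right_diagonal_arr get_right_diagonal_arr get_right_diagonal_arr_alt
  rw [whileA_closed]
  congr 1
  · apply List.map_congr_left
    intro r hr
    rw [right_diagA_closed array (array.length - r) r 0 "" (le_refl _)]
    simp only [String.empty_append, Nat.sub_zero]
    have : min (array.length - r) array.length = array.length - r := by omega
    rw [this]
    simp
  · apply List.map_congr_left
    intro i hi
    simp only [List.mem_range] at hi
    rw [right_diagA_closed array array.length 0 (array.length - 1 - i) "" (by omega)]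
    simp only [String.empty_append, Nat.sub_zero, Nat.zero_add]
    have : min array.length (array.length - (array.length - 1 - i)) =
        array.length - (array.length - 1 - i) := by omega
    rw [this]
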